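-- pv_equiv track=rewrite | github.com/Ivan-49/YandexLyceumPython2024 | Функции. Возвращение значений из функций/Ход конём.py | possible_turns
-- ===== SOURCE A (Python) =====
-- def possible_turns(cell):
--     def to_coords(s):
--         return (ord(s[0]) - ord("A") + 1, int(s[1]))
--
--     def to_cell(coords):
--         return chr(ord("A") + coords[0] - 1) + str(coords[1])
--
--     def valid(coords):
--         return 1 <= coords[0] <= 8 and 1 <= coords[1] <= 8
--
--     x, y = to_coords(cell)
--     moves = [
--         (x + 1, y + 2),
--         (x + 1, y - 2),
--         (x - 1, y + 2),
--         (x - 1, y - 2),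
--         (x + 2, y + 1),
--         (x + 2, y - 1),
--         (x - 2, y + 1),
--         (x - 2, y - 1),
--     ]
--     return sorted([to_cell(m) for m in moves if valid(m)])
-- ===== SOURCE B (Python) =====
-- def possible_turns(cell):
--     x = ord(cell[0]) - ord("A") + 1
--     y = int(cell[1])
--     res = []
--     for col in range(1, 9):
--         for row in range(1, 9):
--             if abs(col - x) * abs(row - y) == 2:
--                 res.append(chr(ord("A") + col - 1) + str(row))
--     return res
-- ===== Notes on version B (the rewrite author's own statement) =====
-- stated objective: alternative
-- what changed: B replaces A's 8-candidate move list + filter + sorted() by a column-major scan of the whole board that tests the knight condition |dc|*|dr| == 2 and emits cells already in sorted order, so no sort is needed.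
import Mathlib
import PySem

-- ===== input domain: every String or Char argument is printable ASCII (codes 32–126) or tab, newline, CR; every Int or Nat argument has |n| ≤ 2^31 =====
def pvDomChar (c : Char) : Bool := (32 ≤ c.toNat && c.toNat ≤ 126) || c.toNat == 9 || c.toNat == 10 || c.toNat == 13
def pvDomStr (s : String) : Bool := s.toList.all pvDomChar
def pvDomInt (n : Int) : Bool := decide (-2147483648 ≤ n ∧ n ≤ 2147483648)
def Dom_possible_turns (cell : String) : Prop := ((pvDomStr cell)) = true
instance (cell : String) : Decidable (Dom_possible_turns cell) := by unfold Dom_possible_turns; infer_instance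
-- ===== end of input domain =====

-- B replaces the 8-candidate list + filter + sorted() by a column-major board scan testing
-- |dc|*|dr| == 2, which emits the cells already in sorted order (alternative decomposition, same cost).


-- ===== PORT A =====
-- to_coords: (ord(s[0]) - ord("A") + 1, int(s[1])); shared parse shape, each port transcribes it.
def pvValidA (c : Int × Int) : Bool :=
  decide (1 ≤ c.1 ∧ c.1 ≤ 8) && decide (1 ≤ c.2 ∧ c.2 ≤ 8)

def pvToCellA (c : Int × Int) : String :=
  String.ofList [Char.ofNat (65 + c.1 - 1).toNat] ++ PySem.Int.toStr c.2

-- body of A after x, y = to_coords(cell)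
def pvTurnsA (x y : Int) : List String :=
  let moves : List (Int × Int) :=
    [(x+1,y+2),(x+1,y-2),(x-1,y+2),(x-1,y-2),(x+2,y+1),(x+2,y-1),(x-2,y+1),(x-2,y-1)]
  PySem.List.sorted ((moves.filter pvValidA).map pvToCellA) (fun s => s) false

def possible_turns (cell : String) : List String :=
  match PySem.Str.pyGet? cell 0, PySem.Str.pyGet? cell 1 with
  | some c0, some c1 =>
    match PySem.Int.ofStr? (String.ofList [c1]) with
    | some y => pvTurnsA ((c0.toNat : Int) - 65 + 1) y
    | none => []
  | _, _ => []

-- ===== PORT B =====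
-- body of B after parsing x, y: column-major scan of the board
def pvScanB (x y : Int) : List String :=
  (PySem.List.pyRange 1 9 1).foldl (fun acc col =>
    (PySem.List.pyRange 1 9 1).foldl (fun acc row =>
      if |col - x| * |row - y| == 2 then
        acc ++ [String.ofList [Char.ofNat (65 + col - 1).toNat] ++ PySem.Int.toStr row]
      else acc) acc) []

def possible_turns_alt (cell : String) : List String :=
  match PySem.Str.pyGet? cell 0 with
  | none => []
  | some c0 =>
    match PySem.Str.pyGet? cell 1 with
    | none => []
    | some c1 =>
      match PySem.Int.ofStr? (String.ofList [c1]) with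
      | none => []
      | some y => pvScanB ((c0.toNat : Int) - 65 + 1) y

-- ===== PRECONDITION & SPEC =====
-- Pre_ excludes exactly the inputs on which Python A raises (IndexError when the cell is
-- shorter than 2 characters, ValueError when cell[1] is not a digit); A returns on all others.
def Pre_possible_turns (cell : String) : Prop :=
  cell.toList[1]?.any Char.isDigit = true
instance (cell : String) : Decidable (Pre_possible_turns cell) := by
  unfold Pre_possible_turns; infer_instance

def pvWitness_possible_turns : String := "B1"

def Spec_possible_turns (cell : String) (out : List String) : Prop := out = possible_turns_alt cell
instance (cell : String) (out : List String) : Decidable (Spec_possible_turns cell out) := by unfold Spec_possible_turns; infer_instance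

-- ===== CLAIM (what is proved, stated in full; the proofs are below) =====
def Claim_equal_possible_turns : Prop := ∀ (cell : String), Dom_possible_turns cell → Pre_possible_turns cell → Spec_possible_turns cell (possible_turns cell)

-- ===== LEMMAS AND PROOFS =====

-- a fold whose step never changes the accumulator returns it unchanged
theorem pv_foldl_id {α β : Type} (f : β → α → β) (l : List α) (acc : β)
    (h : ∀ a ∈ l, ∀ b, f b a = b) : l.foldl f acc = acc := by
  induction l generalizing acc with
  | nil => rfl
  | cons a t ih =>
    simp only [List.foldl]
    rw [h a (by simp)]
    exact ih _ (fun a ha b => h a (by simp [ha]) b)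

theorem pv_range18 : PySem.List.pyRange 1 9 1 = [1,2,3,4,5,6,7,8] := by decide

theorem pv_knight_cond_false (x y col row : Int)
    (hc : 1 ≤ col ∧ col ≤ 8) (hr : 1 ≤ row ∧ row ≤ 8)
    (hout : x ≤ -2 ∨ 11 ≤ x ∨ y ≤ -2 ∨ 11 ≤ y) :
    (|col - x| * |row - y| == 2) = false := by
  have h1 := le_abs_self (col - x)
  have h2 := neg_abs_le (col - x)
  have h3 := le_abs_self (row - y)
  have h4 := neg_abs_le (row - y)
  have hc0 := abs_nonneg (col - x)
  have hr0 := abs_nonneg (row - y)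
  rw [beq_eq_false_iff_ne]
  intro heq
  -- one of the two |·| factors is ≥ 3, the other ≥ 0; a product 2 forces both factors ≤ 2 and ≥ 1
  have hca : |col - x| ≤ 2 := by
    by_contra hgt
    rw [not_le] at hgt
    rcases (by omega : |row - y| = 0 ∨ 1 ≤ |row - y|) with h | h
    · rw [h, mul_zero] at heq; omega
    · nlinarith
  have hra : |row - y| ≤ 2 := by
    by_contra hgt
    rw [not_le] at hgt
    rcases (by omega : |col - x| = 0 ∨ 1 ≤ |col - x|) with h | h
    · rw [h, zero_mul] at heq; omega
    · nlinarith
  omega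

theorem pv_scan_empty (x y : Int) (hout : x ≤ -2 ∨ 11 ≤ x ∨ y ≤ -2 ∨ 11 ≤ y) :
    pvScanB x y = [] := by
  unfold pvScanB
  rw [pv_range18]
  apply pv_foldl_id
  intro col hcol acc
  apply pv_foldl_id
  intro row hrow b
  have hc : 1 ≤ col ∧ col ≤ 8 := by fin_cases hcol <;> omega
  have hr : 1 ≤ row ∧ row ≤ 8 := by fin_cases hrow <;> omega
  rw [pv_knight_cond_false x y col row hc hr hout]
  simp

theorem pv_turnsA_empty (x y : Int) (hout : x ≤ -2 ∨ 11 ≤ x ∨ y ≤ -2 ∨ 11 ≤ y) :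
    pvTurnsA x y = [] := by
  unfold pvTurnsA
  dsimp only
  rw [List.filter_eq_nil_iff.mpr ?_]
  · simp [PySem.List.sorted_eq_nil_iff]
  · intro c hc
    fin_cases hc <;> simp [pvValidA] <;> omega

theorem pv_core_eq (x y : Int) : pvTurnsA x y = pvScanB x y := by
  by_cases hx : -1 ≤ x ∧ x ≤ 10
  · by_cases hy : -1 ≤ y ∧ y ≤ 10
    · obtain ⟨hx1, hx2⟩ := hx
      obtain ⟨hy1, hy2⟩ := hy
      interval_cases x <;> interval_cases y <;>
        (unfold pvTurnsA
         dsimp only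
         refine PySem.List.sorted_eq_of_perm_of_pairwise_lt _ _ _ ?_
           (List.Pairwise.imp (fun h => String.lt_iff_toList_lt.mpr h)
             (?_ : List.Pairwise (fun a b : String => a.toList < b.toList) _)) <;> decide)
    · rw [pv_turnsA_empty x y (by omega), pv_scan_empty x y (by omega)]
  · rw [pv_turnsA_empty x y (by omega), pv_scan_empty x y (by omega)]

-- ===== VERDICT (by name: the statement is the Claim_ definition above) =====
theorem possible_turns_spec : Claim_equal_possible_turns := by
  intro cell _ _
  unfold Spec_possible_turns possible_turns possible_turns_alt
  cases PySem.Str.pyGet? cell 0 <;> cases PySem.Str.pyGet? cell 1 <;> simp only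
  case some.some c0 c1 =>
    cases PySem.Int.ofStr? (String.ofList [c1]) <;> simp only
    case some y => exact pv_core_eq _ y
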